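-- pv_equiv track=rewrite | github.com/Zeekersky/Activities | CV/Assignment 2/q4.py | calculateGradients
-- ===== SOURCE A (Python) =====
-- def calculateGradients(image):
--     sobel_x = [[-1, 0, 1], [-2, 0, 2], [-1, 0, 1]]
--     sobel_y = [[-1, -2, -1], [0, 0, 0], [1, 2, 1]]
--
--     gradient_x = [[0 for _ in range(len(image[0]))] for _ in range(len(image))]
--     gradient_y = [[0 for _ in range(len(image[0]))] for _ in range(len(image))]
--
--     for i in range(1, len(image) - 1):
--         for j in range(1, len(image[0]) - 1):
--             gx = (sobel_x[0][0] * image[i - 1][j - 1] + sobel_x[0][1] * image[i - 1][j] + sobel_x[0][2] * image[i - 1][j + 1] +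
--                   sobel_x[1][0] * image[i][j - 1] + sobel_x[1][1] * image[i][j] + sobel_x[1][2] * image[i][j + 1] +
--                   sobel_x[2][0] * image[i + 1][j - 1] + sobel_x[2][1] * image[i + 1][j] + sobel_x[2][2] * image[i + 1][j + 1])
--
--             gy = (sobel_y[0][0] * image[i - 1][j - 1] + sobel_y[0][1] * image[i - 1][j] + sobel_y[0][2] * image[i - 1][j + 1] +
--                   sobel_y[1][0] * image[i][j - 1] + sobel_y[1][1] * image[i][j] + sobel_y[1][2] * image[i][j + 1] +
--                   sobel_y[2][0] * image[i + 1][j - 1] + sobel_y[2][1] * image[i + 1][j] + sobel_y[2][2] * image[i + 1][j + 1])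
--
--             gradient_x[i][j] = gx
--             gradient_y[i][j] = gy
--
--     return gradient_x, gradient_y
-- ===== SOURCE B (Python) =====
-- def _hsmooth(r, cols):
--     # horizontal 1-2-1 smoothing of row r (interior columns only)
--     return [r[j - 1] + 2 * r[j] + r[j + 1] for j in range(1, cols - 1)]
--
--
-- def _xrow(image, cols, i):
--     # vertical 1-2-1 smoothing at row i, then central difference across columns
--     vs = [image[i - 1][j] + 2 * image[i][j] + image[i + 1][j] for j in range(cols)]
--     return [0] + [vs[j + 1] - vs[j - 1] for j in range(1, cols - 1)] + [0]
--
--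
-- def _yrow(hs, cols, i):
--     # central difference across rows of the horizontally smoothed image
--     return [0] + [hs[i + 1][j - 1] - hs[i - 1][j - 1] for j in range(1, cols - 1)] + [0]
--
--
-- def calculateGradients(image):
--     rows = len(image)
--     cols = len(image[0]) if image else 0
--     zero_row = [0] * cols
--     if rows < 3 or cols < 3:
--         z = [zero_row[:] for _ in range(rows)]
--         return z, [r[:] for r in z]
--     hs = [_hsmooth(r, cols) for r in image]
--     gx = [zero_row[:]] + [_xrow(image, cols, i) for i in range(1, rows - 1)] + [zero_row[:]]
--     gy = [zero_row[:]] + [_yrow(hs, cols, i) for i in range(1, rows - 1)] + [zero_row[:]]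
--     return gx, gy
-- ===== Notes on version B (the rewrite author's own statement) =====
-- stated objective: faster
-- what changed: B replaces A's nine-multiply 3x3 kernel convolution at every pixel by the separable form of the Sobel operator: one 1-2-1 smoothing pass (vertical for gradient_x, horizontal for gradient_y, the latter shared across rows via a precomputed table) followed by a central difference, building each output row as a list instead of writing into preallocated zero matrices.
import Mathlib
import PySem

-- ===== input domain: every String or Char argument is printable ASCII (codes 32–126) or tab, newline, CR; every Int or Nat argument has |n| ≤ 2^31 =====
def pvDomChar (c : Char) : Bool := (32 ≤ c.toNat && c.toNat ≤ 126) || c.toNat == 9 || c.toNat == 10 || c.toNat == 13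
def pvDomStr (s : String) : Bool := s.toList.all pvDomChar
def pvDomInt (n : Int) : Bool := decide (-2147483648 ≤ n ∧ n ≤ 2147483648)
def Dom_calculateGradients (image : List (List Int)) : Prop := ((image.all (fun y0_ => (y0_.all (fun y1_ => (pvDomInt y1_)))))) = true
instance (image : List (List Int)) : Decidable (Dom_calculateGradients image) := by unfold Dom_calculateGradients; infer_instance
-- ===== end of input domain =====

-- B replaces A's nine-multiply 3x3 convolution at every pixel by the separable 1-2-1 smoothing
-- followed by a central difference (fewer operations per pixel); equal on all non-raising inputs.

-- ===== PORT A =====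
-- image[i][j] (indices in range under Pre_; pyGetD is the total form)
def pvIx (image : List (List Int)) (i j : Int) : Int :=
  PySem.List.pyGetD (PySem.List.pyGetD image i []) j 0

-- literal port of A; the constant kernels sobel_x/sobel_y are inlined as the literal coefficients
def calculateGradients (image : List (List Int)) : List (List Int) × List (List Int) :=
  let gradient_x := (PySem.List.pyRange 0 (image.length : Int) 1).map
      (fun _ => (PySem.List.pyRange 0 ((PySem.List.pyGetD image 0 []).length : Int) 1).map (fun _ => (0 : Int)))
  let gradient_y := (PySem.List.pyRange 0 (image.length : Int) 1).map
      (fun _ => (PySem.List.pyRange 0 ((PySem.List.pyGetD image 0 []).length : Int) 1).map (fun _ => (0 : Int)))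
  (PySem.List.pyRange 1 ((image.length : Int) - 1) 1).foldl
    (fun st i =>
      (PySem.List.pyRange 1 (((PySem.List.pyGetD image 0 []).length : Int) - 1) 1).foldl
        (fun st j =>
          let gx := (-1) * pvIx image (i-1) (j-1) + 0 * pvIx image (i-1) j + 1 * pvIx image (i-1) (j+1)
                  + (-2) * pvIx image i (j-1) + 0 * pvIx image i j + 2 * pvIx image i (j+1)
                  + (-1) * pvIx image (i+1) (j-1) + 0 * pvIx image (i+1) j + 1 * pvIx image (i+1) (j+1)
          let gy := (-1) * pvIx image (i-1) (j-1) + (-2) * pvIx image (i-1) j + (-1) * pvIx image (i-1) (j+1)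
                  + 0 * pvIx image i (j-1) + 0 * pvIx image i j + 0 * pvIx image i (j+1)
                  + 1 * pvIx image (i+1) (j-1) + 2 * pvIx image (i+1) j + 1 * pvIx image (i+1) (j+1)
          ( PySem.List.pySetD st.1 i (PySem.List.pySetD (PySem.List.pyGetD st.1 i []) j gx),
            PySem.List.pySetD st.2 i (PySem.List.pySetD (PySem.List.pyGetD st.2 i []) j gy) ))
        st)
    (gradient_x, gradient_y)

-- ===== PORT B =====
-- r[j] for a plain list (total form, in range under Pre_)
def pvAt (r : List Int) (j : Int) : Int := PySem.List.pyGetD r j 0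
-- image[i] (a row)
def pvRow (m : List (List Int)) (i : Int) : List Int := PySem.List.pyGetD m i []
-- cols = len(image[0]) if image else 0  (as a Nat, and as the Int the loops use)
def pvColsN (image : List (List Int)) : Nat :=
  if image = [] then 0 else (PySem.List.pyGetD image 0 []).length
def pvCols (image : List (List Int)) : Int := (pvColsN image : Int)

-- _hsmooth(r, cols)
def pvHrow (r : List Int) (cols : Int) : List Int :=
  (PySem.List.pyRange 1 (cols-1) 1).map (fun j => pvAt r (j-1) + 2 * pvAt r j + pvAt r (j+1))

-- the list vs of _xrow (bound once in Source B, referenced twice below by name)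
def pvVs (image : List (List Int)) (cols : Int) (i : Int) : List Int :=
  (PySem.List.pyRange 0 cols 1).map
    (fun j => pvAt (pvRow image (i-1)) j + 2 * pvAt (pvRow image i) j + pvAt (pvRow image (i+1)) j)

-- _xrow(image, cols, i)
def pvXrow (image : List (List Int)) (cols : Int) (i : Int) : List Int :=
  [0] ++ (PySem.List.pyRange 1 (cols-1) 1).map
    (fun j => pvAt (pvVs image cols i) (j+1) - pvAt (pvVs image cols i) (j-1)) ++ [0]

-- _yrow(hs, cols, i)
def pvYrow (hs : List (List Int)) (cols : Int) (i : Int) : List Int :=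
  [0] ++ (PySem.List.pyRange 1 (cols-1) 1).map
    (fun j => pvAt (pvRow hs (i+1)) (j-1) - pvAt (pvRow hs (i-1)) (j-1)) ++ [0]

def calculateGradients_alt (image : List (List Int)) : List (List Int) × List (List Int) :=
  if image.length < 3 ∨ pvColsN image < 3 then
    ((PySem.List.pyRange 0 (image.length : Int) 1).map
        (fun _ => List.replicate (pvColsN image) (0:Int)),
     ((PySem.List.pyRange 0 (image.length : Int) 1).map
        (fun _ => List.replicate (pvColsN image) (0:Int))).map (fun r => r))
  else
    ([List.replicate (pvColsN image) (0:Int)]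
       ++ (PySem.List.pyRange 1 ((image.length : Int) - 1) 1).map
            (fun i => pvXrow image (pvCols image) i)
       ++ [List.replicate (pvColsN image) (0:Int)],
     [List.replicate (pvColsN image) (0:Int)]
       ++ (PySem.List.pyRange 1 ((image.length : Int) - 1) 1).map
            (fun i => pvYrow (image.map (fun r => pvHrow r (pvCols image))) (pvCols image) i)
       ++ [List.replicate (pvColsN image) (0:Int)])

-- ===== PRECONDITION & SPEC =====
-- Pre_ excludes exactly the ragged images with at least 3 rows and at least 3 columns in row 0 and
-- some row shorter than row 0: there the interior convolution loop makes both Python A and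
-- Python B raise IndexError, so neither returns a value.
def Pre_calculateGradients (image : List (List Int)) : Prop :=
  3 ≤ image.length → 3 ≤ image.headI.length →
    ∀ r ∈ image, image.headI.length ≤ r.length
instance (image : List (List Int)) : Decidable (Pre_calculateGradients image) := by
  unfold Pre_calculateGradients; infer_instance

def pvWitness_calculateGradients : List (List Int) := [[1, 2, 3], [4, 5, 6], [7, 8, 9]]

def Spec_calculateGradients (image : List (List Int)) (out : List (List Int) × List (List Int)) : Prop := out = calculateGradients_alt image
instance (image : List (List Int)) (out : List (List Int) × List (List Int)) : Decidable (Spec_calculateGradients image out) := by unfold Spec_calculateGradients; infer_instance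

-- ===== CLAIM (what is proved, stated in full; the proofs are below) =====
def Claim_equal_calculateGradients : Prop := ∀ (image : List (List Int)), Dom_calculateGradients image → Pre_calculateGradients image → Spec_calculateGradients image (calculateGradients image)

-- ===== LEMMAS AND PROOFS =====

theorem pvColsN_eq (image : List (List Int)) :
    pvColsN image = (PySem.List.pyGetD image 0 []).length := by
  cases image with
  | nil => rfl
  | cons h t => simp [pvColsN]

theorem pvCols_eq (image : List (List Int)) :
    pvCols image = ((PySem.List.pyGetD image 0 []).length : Int) := by
  unfold pvCols; rw [pvColsN_eq]

-- entry read m[i][j] with default 0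
def pvE (m : List (List Int)) (i j : Nat) : Int := (m.getD i []).getD j 0

def pvStep (w : Nat → Nat → Int) (m : List (List Int)) (p : Nat × Nat) : List (List Int) :=
  m.set p.1 ((m.getD p.1 []).set p.2 (w p.1 p.2))

theorem pvFoldPair {α β γ : Type} (f : α → γ → α) (g : β → γ → β) (l : List γ) (p : α × β) :
    l.foldl (fun q x => (f q.1 x, g q.2 x)) p = (l.foldl f p.1, l.foldl g p.2) := by
  induction l generalizing p with
  | nil => rfl
  | cons x t ih => simpa using ih (f p.1 x, g p.2 x)

theorem pvEntryFold_length (w : Nat → Nat → Int) :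
    ∀ (ps : List (Nat × Nat)) (m : List (List Int)),
      (ps.foldl (pvStep w) m).length = m.length := by
  intro ps
  induction ps with
  | nil => intro m; rfl
  | cons p t ih => intro m; simp [List.foldl_cons, ih, pvStep]

theorem pvEntryFold_rowlen (w : Nat → Nat → Int) :
    ∀ (ps : List (Nat × Nat)) (m : List (List Int)) (i : Nat),
      ((ps.foldl (pvStep w) m).getD i []).length = (m.getD i []).length := by
  intro ps
  induction ps with
  | nil => intro m i; rfl
  | cons p t ih =>
    intro m i
    rw [List.foldl_cons, ih]
    simp only [pvStep, List.getD_eq_getElem?_getD, List.getElem?_set]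
    split_ifs with h1 h2
    · simp [← h1]
    · simp [← h1, List.getElem?_eq_none (Nat.le_of_not_lt h2)]
    · rfl

theorem pvEntryFold_E (w : Nat → Nat → Int) :
    ∀ (ps : List (Nat × Nat)) (m : List (List Int)) (i j : Nat),
      pvE (ps.foldl (pvStep w) m) i j =
        if (i, j) ∈ ps ∧ i < m.length ∧ j < (m.getD i []).length then w i j
        else pvE m i j := by
  intro ps
  induction ps with
  | nil => intro m i j; simp [pvE]
  | cons p t ih =>
    intro m i j
    rw [List.foldl_cons, ih]
    have hlen : (pvStep w m p).length = m.length := by simp [pvStep]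
    have hrow : ∀ k, ((pvStep w m p).getD k []).length = (m.getD k []).length := by
      intro k
      simp only [pvStep, List.getD_eq_getElem?_getD, List.getElem?_set]
      split_ifs with h1 h2
      · simp [← h1]
      · simp [← h1, List.getElem?_eq_none (Nat.le_of_not_lt h2)]
      · rfl
    rw [hlen, hrow]
    by_cases hmem : (i, j) = p
    · -- the head write is at (i,j)
      subst hmem
      by_cases hb : i < m.length ∧ j < (m.getD i []).length
      · by_cases ht : (i, j) ∈ t
        · rw [if_pos ⟨ht, hb.1, hb.2⟩, if_pos ⟨List.mem_cons_self, hb⟩]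
        · rw [if_neg (by simp [ht]), if_pos ⟨List.mem_cons_self, hb⟩]
          have hb2 : j < m[i].length := by
            have h2 := hb.2
            rwa [List.getD_eq_getElem?_getD, List.getElem?_eq_getElem hb.1] at h2
          simp [pvStep, pvE, List.getD_eq_getElem?_getD, hb.1, hb2]
      · -- out of bounds: write is a no-op
        have hstep : pvE (pvStep w m (i, j)) i j = pvE m i j := by
          by_cases h1 : i < m.length
          · have h2 : ¬ j < (m.getD i []).length := fun h => hb ⟨h1, h⟩
            have h2' : ¬ j < m[i].length := by
              rwa [List.getD_eq_getElem?_getD, List.getElem?_eq_getElem h1] at h2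
            simp [pvStep, pvE, List.getD_eq_getElem?_getD, h1, h2']
          · simp [pvStep, pvE, List.getD_eq_getElem?_getD, h1]
        rw [hstep]
        rw [if_neg (fun h => hb h.2), if_neg (fun h => hb h.2)]
    · have hstep : pvE (pvStep w m p) i j = pvE m i j := by
        by_cases hi : i = p.1
        · have hj : j ≠ p.2 := by
            intro h; exact hmem (by cases p; simp_all)
          by_cases h1 : p.1 < m.length
          · simp [pvStep, pvE, List.getD_eq_getElem?_getD, hi, h1, Ne.symm hj]
          · simp [pvStep, pvE, List.getD_eq_getElem?_getD, hi, h1]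
        · simp [pvStep, pvE, List.getD_eq_getElem?_getD, Ne.symm hi]
      rw [hstep]
      simp only [List.mem_cons, hmem, false_or]

theorem pvRHS_len (w : Nat → Nat → Int) (n c : Nat) (hn : 3 ≤ n) :
    (List.replicate c (0:Int) ::
      ((List.range (n-2)).map (fun a =>
        (0:Int) :: ((List.range (c-2)).map (fun b => w (1+a) (1+b)) ++ [0]))
      ++ [List.replicate c 0])).length = n := by
  simp; omega

theorem pvRHS_rowlen (w : Nat → Nat → Int) (n c : Nat) (hc : 3 ≤ c)
    (i : Nat) (hi : i < n) (h : i < (List.replicate c (0:Int) ::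
      ((List.range (n-2)).map (fun a =>
        (0:Int) :: ((List.range (c-2)).map (fun b => w (1+a) (1+b)) ++ [0]))
      ++ [List.replicate c 0])).length) :
    ((List.replicate c (0:Int) ::
      ((List.range (n-2)).map (fun a =>
        (0:Int) :: ((List.range (c-2)).map (fun b => w (1+a) (1+b)) ++ [0]))
      ++ [List.replicate c 0]))[i]).length = c := by
  rcases i with _ | k
  · simp
  · rw [List.getElem_cons_succ]
    by_cases hk : k < n - 2
    · rw [List.getElem_append_left (by simpa using hk)]
      simp; omega
    · rw [List.getElem_append_right (by simpa using hk)]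
      simp

theorem pvRHS_entry (w : Nat → Nat → Int) (n c : Nat) (hn : 3 ≤ n) (hc : 3 ≤ c)
    (i j : Nat) (hi : i < n) (hj : j < c) :
    pvE (List.replicate c (0:Int) ::
      ((List.range (n-2)).map (fun a =>
        (0:Int) :: ((List.range (c-2)).map (fun b => w (1+a) (1+b)) ++ [0]))
      ++ [List.replicate c 0])) i j =
    if 1 ≤ i ∧ i < n-1 ∧ 1 ≤ j ∧ j < c-1 then w i j else 0 := by
  unfold pvE
  rcases i with _ | k
  · simp
  · rw [List.getD_cons_succ]
    by_cases hk : k < n - 2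
    · have hk' : k < (((List.range (n-2)).map (fun a =>
          (0:Int) :: ((List.range (c-2)).map (fun b => w (1+a) (1+b)) ++ [0]))
          ++ [List.replicate c 0])).length := by simp; omega
      rw [List.getD_eq_getElem _ _ hk',
        List.getElem_append_left (by simpa using hk), List.getElem_map, List.getElem_range]
      rcases j with _ | u
      · simp
      · rw [List.getD_cons_succ]
        by_cases hu : u < c - 2
        · have hu' : u < (((List.range (c-2)).map (fun b => w (1+k) (1+b)) ++ [(0:Int)])).length := by
            simp; omega
          rw [List.getD_eq_getElem _ _ hu',
            List.getElem_append_left (by simpa using hu), List.getElem_map, List.getElem_range,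
            if_pos (by omega)]
          congr 1 <;> omega
        · have hu' : u < (((List.range (c-2)).map (fun b => w (1+k) (1+b)) ++ [(0:Int)])).length := by
            simp; omega
          rw [List.getD_eq_getElem _ _ hu',
            List.getElem_append_right (by simpa using hu)]
          rw [if_neg (by omega)]
          simp
    · have hk2 : k = n - 2 := by omega
      have hk' : k < (((List.range (n-2)).map (fun a =>
          (0:Int) :: ((List.range (c-2)).map (fun b => w (1+a) (1+b)) ++ [0]))
          ++ [List.replicate c 0])).length := by simp; omega
      rw [List.getD_eq_getElem _ _ hk',
        List.getElem_append_right (by simpa using hk)]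
      rw [if_neg (by omega)]
      simp

theorem pvE_eq_getElem (m : List (List Int)) (i j : Nat) (h1 : i < m.length) (h2 : j < m[i].length) :
    pvE m i j = m[i][j] := by
  unfold pvE
  rw [List.getD_eq_getElem _ _ h1, List.getD_eq_getElem _ _ h2]

theorem pvComponent (w : Nat → Nat → Int) (n c : Nat) (hn : 3 ≤ n) (hc : 3 ≤ c) :
    ((List.range (n-2)).flatMap (fun a => (List.range (c-2)).map (fun b => (1+a, 1+b)))).foldl
      (pvStep w) (List.replicate n (List.replicate c (0:Int)))
    = List.replicate c 0 ::
        ((List.range (n-2)).map (fun a =>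
          (0:Int) :: ((List.range (c-2)).map (fun b => w (1+a) (1+b)) ++ [0]))
        ++ [List.replicate c 0]) := by
  have hmem : ∀ i j : Nat,
      ((i, j) ∈ (List.range (n-2)).flatMap (fun a => (List.range (c-2)).map (fun b => (1+a, 1+b))))
      ↔ (1 ≤ i ∧ i < n-1 ∧ 1 ≤ j ∧ j < c-1) := by
    intro i j
    simp only [List.mem_flatMap, List.mem_map, List.mem_range, Prod.mk.injEq]
    constructor
    · rintro ⟨a, ha, b, hb, h1, h2⟩; omega
    · rintro ⟨h1, h2, h3, h4⟩
      exact ⟨i - 1, by omega, j - 1, by omega, by omega, by omega⟩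
  have hLlen : (((List.range (n-2)).flatMap (fun a => (List.range (c-2)).map (fun b => (1+a, 1+b)))).foldl
      (pvStep w) (List.replicate n (List.replicate c (0:Int)))).length = n := by
    rw [pvEntryFold_length]; simp
  have hinitrow : ∀ i : Nat, i < n →
      (List.replicate n (List.replicate c (0:Int))).getD i [] = List.replicate c 0 := by
    intro i hi
    rw [List.getD_eq_getElem _ _ (by simpa using hi), List.getElem_replicate]
  apply List.ext_getElem
  · rw [hLlen, pvRHS_len w n c hn]
  intro i h1 h2
  have hi : i < n := by rw [← hLlen]; exact h1
  have hLrow : ∀ k : Nat, k < n → ((((List.range (n-2)).flatMap (fun a => (List.range (c-2)).map (fun b => (1+a, 1+b)))).foldl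
      (pvStep w) (List.replicate n (List.replicate c (0:Int)))).getD k []).length = c := by
    intro k hk
    rw [pvEntryFold_rowlen, hinitrow k hk, List.length_replicate]
  apply List.ext_getElem
  · rw [pvRHS_rowlen w n c hc i hi]
    have := hLrow i hi
    rw [List.getD_eq_getElem _ _ h1] at this
    exact this
  intro j hj1 hj2
  have hjc : j < c := by
    rw [pvRHS_rowlen w n c hc i hi] at hj2; exact hj2
  rw [← pvE_eq_getElem _ _ _ h1 hj1, ← pvE_eq_getElem _ _ _ h2 hj2,
     pvRHS_entry w n c hn hc i j hi hjc, pvEntryFold_E]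
  simp only [hmem]
  by_cases hint : 1 ≤ i ∧ i < n-1 ∧ 1 ≤ j ∧ j < c-1
  · rw [if_pos ⟨hint, by simpa using hi, by rw [hinitrow i hi]; simpa using hjc⟩, if_pos hint]
  · rw [if_neg (by rintro ⟨h, _⟩; exact hint h), if_neg hint]
    unfold pvE
    rw [hinitrow i hi, List.getD_eq_getElem _ _ (by simpa using hjc), List.getElem_replicate]
-- value functions written by A at interior cell (i, j)
def wAx (image : List (List Int)) (i j : Nat) : Int :=
  (-1) * pvIx image (↑i-1) (↑j-1) + 0 * pvIx image (↑i-1) ↑j + 1 * pvIx image (↑i-1) (↑j+1)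
  + (-2) * pvIx image ↑i (↑j-1) + 0 * pvIx image ↑i ↑j + 2 * pvIx image ↑i (↑j+1)
  + (-1) * pvIx image (↑i+1) (↑j-1) + 0 * pvIx image (↑i+1) ↑j + 1 * pvIx image (↑i+1) (↑j+1)

def wAy (image : List (List Int)) (i j : Nat) : Int :=
  (-1) * pvIx image (↑i-1) (↑j-1) + (-2) * pvIx image (↑i-1) ↑j + (-1) * pvIx image (↑i-1) (↑j+1)
  + 0 * pvIx image ↑i (↑j-1) + 0 * pvIx image ↑i ↑j + 0 * pvIx image ↑i (↑j+1)
  + 1 * pvIx image (↑i+1) (↑j-1) + 2 * pvIx image (↑i+1) ↑j + 1 * pvIx image (↑i+1) (↑j+1)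

theorem pvCast1 (k : Nat) : (1:Int) + (k:Int) = ((1+k : Nat) : Int) := by push_cast; ring
theorem pvCastSub (k : Nat) : (((1+k : Nat) : Int)) - 1 = (k : Int) := by push_cast; ring
theorem pvCastAdd (k : Nat) : (((1+k : Nat) : Int)) + 1 = ((k+2 : Nat) : Int) := by push_cast; ring

theorem pvZeros {α : Type} (t : Nat) (x : α) :
    (PySem.List.pyRange 0 (t:Int) 1).map (fun _ => x) = List.replicate t x := by
  refine List.eq_replicate_iff.mpr ⟨by simp [PySem.List.length_pyRange_one], ?_⟩
  intro b hb
  rcases List.mem_map.1 hb with ⟨k, _, rfl⟩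
  rfl


theorem pvFoldRange {α : Type} (t : Nat) (f : α → Int → α) (init : α) :
    (PySem.List.pyRange 1 ((t:Int)-1) 1).foldl f init
      = (List.range (t-2)).foldl (fun acc k => f acc (((1+k : Nat) : Int))) init := by
  rw [PySem.List.pyRange_one]
  have h : ((t:Int)-1-1).toNat = t-2 := by omega
  rw [h, List.foldl_map]
  apply PySem.List.foldl_congr_mem
  intro acc x _
  congr 1

theorem pvSplitNested (w1 w2 : Nat → Nat → Int) (is js : List Nat) (p : List (List Int) × List (List Int)) :
    is.foldl (fun st i => js.foldl (fun st' j =>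
        (pvStep w1 st'.1 (1+i, 1+j), pvStep w2 st'.2 (1+i, 1+j))) st) p
    = ((is.flatMap (fun a => js.map (fun b => (1+a, 1+b)))).foldl (pvStep w1) p.1,
       (is.flatMap (fun a => js.map (fun b => (1+a, 1+b)))).foldl (pvStep w2) p.2) := by
  induction is generalizing p with
  | nil => simp
  | cons i t ih =>
    have hinner : js.foldl (fun st' j =>
        (pvStep w1 st'.1 (1+i, 1+j), pvStep w2 st'.2 (1+i, 1+j))) p
        = (js.foldl (fun m j => pvStep w1 m (1+i, 1+j)) p.1,
           js.foldl (fun m j => pvStep w2 m (1+i, 1+j)) p.2) :=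
      pvFoldPair (fun m j => pvStep w1 m (1+i, 1+j)) (fun m j => pvStep w2 m (1+i, 1+j)) js p
    rw [List.foldl_cons, ih, hinner]
    simp only [List.flatMap_cons, List.foldl_append, List.foldl_map]

theorem A_shape (image : List (List Int)) :
    calculateGradients image =
      ( ((List.range (image.length-2)).flatMap (fun a =>
          (List.range ((PySem.List.pyGetD image 0 []).length-2)).map (fun b => (1+a, 1+b)))).foldl
          (pvStep (wAx image))
          (List.replicate image.length (List.replicate (PySem.List.pyGetD image 0 []).length 0)),
        ((List.range (image.length-2)).flatMap (fun a =>
          (List.range ((PySem.List.pyGetD image 0 []).length-2)).map (fun b => (1+a, 1+b)))).foldl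
          (pvStep (wAy image))
          (List.replicate image.length (List.replicate (PySem.List.pyGetD image 0 []).length 0)) ) := by
  unfold calculateGradients
  rw [pvFoldRange]
  simp only [pvFoldRange, pvZeros, PySem.List.pySetD_natCast, PySem.List.pyGetD_natCast]
  exact pvSplitNested (wAx image) (wAy image) (List.range (image.length-2))
    (List.range ((PySem.List.pyGetD image 0 []).length-2))
    (List.replicate image.length (List.replicate (PySem.List.pyGetD image 0 []).length 0),
     List.replicate image.length (List.replicate (PySem.List.pyGetD image 0 []).length 0))

theorem pvXrow_eq (image : List (List Int)) (t : Nat)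
    (hc : 3 ≤ (PySem.List.pyGetD image 0 []).length) :
    pvXrow image (pvCols image) (((1+t : Nat) : Int))
      = 0 :: ((List.range ((PySem.List.pyGetD image 0 []).length - 2)).map
          (fun b => wAx image (1+t) (1+b)) ++ [0]) := by
  unfold pvXrow
  simp only [List.nil_append, List.cons_append]
  refine congrArg₂ List.cons rfl (congrArg₂ (· ++ ·) ?_ rfl)
  rw [pvCols_eq image,
      PySem.List.pyRange_one,
      show (((PySem.List.pyGetD image 0 []).length : Int) - 1 - 1).toNat
        = (PySem.List.pyGetD image 0 []).length - 2 from by omega,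
      List.map_map]
  apply List.map_congr_left
  intro b hb
  rw [List.mem_range] at hb
  simp only [Function.comp_apply, pvCast1, pvCastAdd, pvCastSub]
  unfold wAx pvVs pvAt
  rw [PySem.List.pyGetD_map_pyRange_of_nonneg _ _ _ _ (by positivity) (by omega),
      PySem.List.pyGetD_map_pyRange_of_nonneg _ _ _ _ (by positivity) (by omega)]
  simp only [pvCastSub, pvCastAdd]
  unfold pvRow pvIx
  ring

theorem pvYrow_eq (image : List (List Int)) (t : Nat)
    (hn : 3 ≤ image.length) (hc : 3 ≤ (PySem.List.pyGetD image 0 []).length)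
    (ht : t < image.length - 2) :
    pvYrow (image.map (fun r => pvHrow r (pvCols image))) (pvCols image) (((1+t : Nat) : Int))
      = 0 :: ((List.range ((PySem.List.pyGetD image 0 []).length - 2)).map
          (fun b => wAy image (1+t) (1+b)) ++ [0]) := by
  unfold pvYrow
  simp only [List.nil_append, List.cons_append]
  refine congrArg₂ List.cons rfl (congrArg₂ (· ++ ·) ?_ rfl)
  rw [pvCols_eq image,
      PySem.List.pyRange_one,
      show (((PySem.List.pyGetD image 0 []).length : Int) - 1 - 1).toNat
        = (PySem.List.pyGetD image 0 []).length - 2 from by omega,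
      List.map_map]
  apply List.map_congr_left
  intro b hb
  rw [List.mem_range] at hb
  simp only [Function.comp_apply, pvCast1, pvCastAdd, pvCastSub]
  unfold pvRow
  simp only [PySem.List.pyGetD_natCast]
  rw [List.getD_eq_getElem _ _ (by simp; omega : t+2 < (image.map (fun r => pvHrow r ((PySem.List.pyGetD image 0 []).length : Int))).length),
      List.getD_eq_getElem _ _ (by simp; omega : t < (image.map (fun r => pvHrow r ((PySem.List.pyGetD image 0 []).length : Int))).length),
      List.getElem_map, List.getElem_map]
  unfold pvHrow pvAt
  rw [PySem.List.pyGetD_map_pyRange_one _ _ _ _ _ (by omega),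
      PySem.List.pyGetD_map_pyRange_one _ _ _ _ _ (by omega)]
  unfold wAy pvIx
  simp only [pvCast1, pvCastAdd, pvCastSub]
  simp only [PySem.List.pyGetD_natCast]
  rw [List.getD_eq_getElem _ _ (by omega : t+2 < image.length),
      List.getD_eq_getElem _ _ (by omega : t < image.length)]
  ring

theorem B_shape (image : List (List Int))
    (hn : 3 ≤ image.length) (hc : 3 ≤ (PySem.List.pyGetD image 0 []).length) :
    calculateGradients_alt image =
      ( List.replicate (PySem.List.pyGetD image 0 []).length 0 ::
          ((List.range (image.length-2)).map (fun a =>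
            (0:Int) :: ((List.range ((PySem.List.pyGetD image 0 []).length-2)).map
              (fun b => wAx image (1+a) (1+b)) ++ [0]))
          ++ [List.replicate (PySem.List.pyGetD image 0 []).length 0]),
        List.replicate (PySem.List.pyGetD image 0 []).length 0 ::
          ((List.range (image.length-2)).map (fun a =>
            (0:Int) :: ((List.range ((PySem.List.pyGetD image 0 []).length-2)).map
              (fun b => wAy image (1+a) (1+b)) ++ [0]))
          ++ [List.replicate (PySem.List.pyGetD image 0 []).length 0]) ) := by
  unfold calculateGradients_alt
  rw [if_neg (by rw [pvColsN_eq]; omega)]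
  rw [pvColsN_eq image]
  rw [PySem.List.pyRange_one,
      show (((image.length : Int) - 1 - 1).toNat) = image.length - 2 from by omega,
      List.map_map, List.map_map]
  refine Prod.ext ?_ ?_
  · simp only [List.nil_append, List.cons_append]
    refine congrArg₂ List.cons rfl (congrArg₂ (· ++ ·) ?_ rfl)
    apply List.map_congr_left
    intro a ha
    rw [List.mem_range] at ha
    simp only [Function.comp_apply, pvCast1]
    exact pvXrow_eq image a hc
  · simp only [List.nil_append, List.cons_append]
    refine congrArg₂ List.cons rfl (congrArg₂ (· ++ ·) ?_ rfl)
    apply List.map_congr_left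
    intro a ha
    rw [List.mem_range] at ha
    simp only [Function.comp_apply, pvCast1]
    exact pvYrow_eq image a hn hc ha

theorem main_eq (image : List (List Int)) :
    calculateGradients image = calculateGradients_alt image := by
  by_cases h : image.length < 3 ∨ (PySem.List.pyGetD image 0 []).length < 3
  · -- no interior pixels: both return the all-zero matrices
    rw [A_shape]
    unfold calculateGradients_alt
    rw [if_pos (by rw [pvColsN_eq]; omega)]
    have hempty : ((List.range (image.length-2)).flatMap (fun a =>
        (List.range ((PySem.List.pyGetD image 0 []).length-2)).map (fun b => (1+a, 1+b)))) = [] := by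
      rcases h with h | h
      · rw [show image.length - 2 = 0 from by omega]; rfl
      · rw [show (PySem.List.pyGetD image 0 []).length - 2 = 0 from by omega]
        simp
    rw [hempty, pvColsN_eq image]
    simp only [List.foldl_nil, pvZeros, List.map_id']
  · have h1 : 3 ≤ image.length := by omega
    have h2 : 3 ≤ (PySem.List.pyGetD image 0 []).length := by omega
    rw [A_shape, pvComponent _ _ _ h1 h2, pvComponent _ _ _ h1 h2,
        B_shape image h1 h2]

-- ===== VERDICT (by name: the statement is the Claim_ definition above) =====
theorem calculateGradients_spec : Claim_equal_calculateGradients := by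
  intro image _ _
  unfold Spec_calculateGradients
  exact main_eq image
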